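-- pv_equiv track=rewrite | github.com/aniruddhapaik/university-code | Python Data Analytics/remdupe.py | remdupe
-- ===== SOURCE A (Python) =====
-- def remdupe(str):
--   strtwo = list(str)
--   track = {}
--   for i in range(len(str)):
--     if str[i] in track:
--       strtwo[i] = ' '
--     else :
--       track[str[i]] = True
--   return strtwo
-- ===== SOURCE B (Python) =====
-- def remdupe(str):
--   out = []
--   rest = list(str)
--   while rest:
--     c = rest.pop()
--     out.append(' ' if c in rest else c)
--   out.reverse()
--   return out
-- ===== Notes on version B (the rewrite author's own statement) =====
-- stated objective: alternative
-- what changed: Consumes the string back-to-front with pop(), blanking each character iff it still occurs in the shrinking remainder (i.e. appears earlier), building the output in reverse and flipping it once at the end - no seen-dictionary and no indexed in-place update.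
import Mathlib
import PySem

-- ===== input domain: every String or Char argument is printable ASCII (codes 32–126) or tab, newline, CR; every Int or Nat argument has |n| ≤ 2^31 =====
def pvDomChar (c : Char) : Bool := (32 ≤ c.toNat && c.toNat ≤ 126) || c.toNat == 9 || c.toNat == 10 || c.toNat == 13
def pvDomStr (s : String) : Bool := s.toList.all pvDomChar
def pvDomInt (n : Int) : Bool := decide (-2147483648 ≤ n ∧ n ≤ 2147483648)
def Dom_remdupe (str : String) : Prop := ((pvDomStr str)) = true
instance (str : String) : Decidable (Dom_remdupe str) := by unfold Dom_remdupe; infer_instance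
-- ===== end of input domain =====

-- B consumes the string back-to-front with pop(), blanking a char iff it still occurs in the shrinking remainder, then reverses the output once; alternative decomposition, not faster.


-- ===== PORT A =====
-- literal port: strtwo = list(str); track = {}; for i in range(len(str)): …
-- str[i] with 0 ≤ i < len never raises, ported as pyGetD (exact there); strtwo[i] = ' ' as List.set.
def remdupe (str : String) : List String :=
  let cs := str.toList
  let strtwo := cs.map (fun c => String.mk [c])
  let res := (PySem.List.pyRange 0 cs.length 1).foldl
    (fun (st : List String × PySem.Dict Char Bool) i =>
      let c := PySem.List.pyGetD cs i ' '
      if st.2.contains c then (st.1.set i.toNat " ", st.2)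
      else (st.1, st.2.insert c true))
    (strtwo, PySem.Dict.empty)
  res.1

-- ===== PORT B =====
-- literal port of Source B's while loop: rest.pop() on a nonempty list is exactly getLast/dropLast;
-- out.append as ++ [·]; the final out.reverse() as List.reverse.
def pvGoB (rest : List Char) (out : List String) : List String :=
  if h : rest = [] then out.reverse
  else
    let c := rest.getLast h
    let rest' := rest.dropLast
    pvGoB rest' (out ++ [if c ∈ rest' then " " else String.mk [c]])
termination_by rest.length
decreasing_by
  simp only [List.length_dropLast]
  exact Nat.sub_lt (List.length_pos_iff.mpr h) Nat.one_pos

def remdupe_alt (str : String) : List String :=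
  pvGoB str.toList []

-- ===== PRECONDITION & SPEC =====
def Spec_remdupe (str : String) (out : List String) : Prop := out = remdupe_alt str
instance (str : String) (out : List String) : Decidable (Spec_remdupe str out) := by unfold Spec_remdupe; infer_instance

-- ===== CLAIM (what is proved, stated in full; the proofs are below) =====
def Claim_equal_remdupe : Prop := ∀ (str : String), Dom_remdupe str → Spec_remdupe str (remdupe str)

-- ===== LEMMAS AND PROOFS =====

-- common reference result: blank each char that occurs in the accumulated prefix `pre`
def pvBlank : List Char → List Char → List String
  | _, [] => []
  | pre, c :: rest => (if c ∈ pre then " " else String.mk [c]) :: pvBlank (pre ++ [c]) rest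

theorem pvLoopA (suf : List Char) : ∀ (pre : List Char) (done : List String) (tr : PySem.Dict Char Bool),
    done.length = pre.length →
    (∀ c, tr.contains c = decide (c ∈ pre)) →
    ((PySem.List.pyRange (pre.length) (pre.length + suf.length) 1).foldl
      (fun (st : List String × PySem.Dict Char Bool) i =>
        let c := PySem.List.pyGetD (pre ++ suf) i ' '
        if st.2.contains c then (st.1.set i.toNat " ", st.2)
        else (st.1, st.2.insert c true))
      (done ++ suf.map (fun c => String.mk [c]), tr)).1
    = done ++ pvBlank pre suf := by
  induction suf with
  | nil =>
    intro pre done tr _ _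
    simp [PySem.List.pyRange_one_eq_nil, pvBlank]
  | cons c rest ih =>
    intro pre done tr hlen htr
    have hcons : PySem.List.pyRange (pre.length) (pre.length + (c :: rest).length) 1
        = (pre.length : Int) :: PySem.List.pyRange ((pre.length : Int) + 1) (pre.length + (c :: rest).length) 1 := by
      apply PySem.List.pyRange_one_cons; simp
    rw [hcons]
    simp only [List.foldl_cons]
    have hget : PySem.List.pyGetD (pre ++ c :: rest) (pre.length : Int) ' ' = c := by
      rw [PySem.List.pyGetD_natCast]
      simp
    have harith : (pre.length : Int) + 1 = ((pre ++ [c]).length : Int) := by simp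
    have hend : (pre.length : Int) + ((c :: rest).length : Int)
        = ((pre ++ [c]).length : Int) + (rest.length : Int) := by simp; omega
    have hlist : pre ++ c :: rest = (pre ++ [c]) ++ rest := by simp
    simp only [hget, htr]
    by_cases hc : c ∈ pre
    · simp only [hc, decide_true, List.map_cons, reduceIte, Int.toNat_natCast]
      have hset : (done ++ String.mk [c] :: List.map (fun c => String.mk [c]) rest).set pre.length " "
          = (done ++ [(" " : String)]) ++ List.map (fun c => String.mk [c]) rest := by
        rw [← hlen, List.set_append_right _ _ (le_refl _)]
        simp
      rw [hset, harith, hend, hlist,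
        ih (pre ++ [c]) (done ++ [" "]) tr (by simp [hlen])
          (by
            intro c'
            rw [htr]
            by_cases h : c' = c
            · subst h; simp [hc]
            · simp [h])]
      simp [pvBlank, hc]
    · simp only [hc, decide_false, List.map_cons, Bool.false_eq_true, reduceIte]
      have hre : done ++ String.mk [c] :: List.map (fun c => String.mk [c]) rest
          = (done ++ [String.mk [c]]) ++ List.map (fun c => String.mk [c]) rest := by simp
      rw [hre, harith, hend, hlist,
        ih (pre ++ [c]) (done ++ [String.mk [c]]) (tr.insert c true) (by simp [hlen])
          (by
            intro c'
            rw [PySem.Dict.contains_insert, htr]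
            by_cases h : c' = c
            · subst h; simp
            · simp [h])]
      simp [pvBlank, hc]

theorem pvBlank_snoc (suf : List Char) : ∀ (pre : List Char) (c : Char),
    pvBlank pre (suf ++ [c]) = pvBlank pre suf ++ [if c ∈ pre ++ suf then " " else String.mk [c]] := by
  induction suf with
  | nil => intro pre c; simp [pvBlank]
  | cons d rest ih =>
    intro pre c
    simp only [List.cons_append, pvBlank, ih (pre ++ [d]) c, List.append_assoc]
    simp

theorem pvGoB_eq (rest : List Char) : ∀ (out : List String),
    pvGoB rest out = pvBlank [] rest ++ out.reverse := by
  induction rest using List.reverseRecOn with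
  | nil => intro out; simp [pvGoB, pvBlank]
  | append_singleton xs c ih =>
    intro out
    rw [pvGoB]
    simp only [List.append_ne_nil_of_right_ne_nil xs (by simp : ([c] : List Char) ≠ []),
      dite_false, List.getLast_concat, List.dropLast_concat]
    rw [ih, pvBlank_snoc]
    simp

-- ===== VERDICT (by name: the statement is the Claim_ definition above) =====
theorem remdupe_spec : Claim_equal_remdupe := by
  intro str _
  unfold Spec_remdupe remdupe remdupe_alt
  have hA := pvLoopA str.toList [] [] PySem.Dict.empty (by simp) (by simp)
  have hB := pvGoB_eq str.toList []
  simp only [List.nil_append, List.length_nil, Nat.cast_zero, zero_add] at hA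
  simp only [List.reverse_nil, List.append_nil] at hB
  exact hA.trans hB.symm
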